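-- pv_equiv track=rewrite | github.com/quanergyO/aoc2022 | aoc6_part2.py | check_marker
-- ===== SOURCE A (Python) =====
-- def check_marker(marker: str):
--     lst = []
--     lst_i = []
--
--     for i in range(len(marker)):
--         if marker[i] in lst:
--             index_to_delete = lst.index(marker[i]) + 1
--             lst = lst[index_to_delete:]
--             lst_i = lst_i[index_to_delete:]
--             lst.append(marker[i])
--             lst_i.append(i)
--             continue
--         else:
--             lst.append(marker[i])
--             lst_i.append(i)
--
--         if len(lst) == 14:
--             return i
--
--         if i + 1 == len(marker):
--             return len(marker) - len(lst)
-- ===== SOURCE B (Python) =====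
-- def check_marker(marker: str):
--     n = len(marker)
--     i = 13
--     while i < n:
--         # scan the window marker[i-13 .. i] backwards; on a duplicate pair
--         # (j, j') every 14-window ending before j + 14 contains it, so jump.
--         seen = set()
--         j = i
--         while j >= i - 13 and marker[j] not in seen:
--             seen.add(marker[j])
--             j -= 1
--         if j < i - 13:
--             return i
--         i = j + 14
--     # no 14-distinct window: index where the longest duplicate-free suffix starts
--     seen = set()
--     j = n - 1
--     while j >= 0 and marker[j] not in seen:
--         seen.add(marker[j])
--         j -= 1
--     return j + 1
-- ===== Notes on version B (the rewrite author's own statement) =====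
-- stated objective: alternative
-- what changed: Replaces A's incrementally maintained sliding window (two parallel lists trimmed via list.index at every character) by the jump algorithm: scan each candidate 14-character window backwards with a set and, on a repeated character, jump the window end past the earlier member of the duplicate pair, skipping most positions; the no-window fallback is one backward scan from the end for the start of the longest duplicate-free suffix.
-- outside the precondition, e.g. on check_marker('aa'): A returns None, B returns 1; on check_marker(''): A returns None, B returns 0
import Mathlib
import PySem

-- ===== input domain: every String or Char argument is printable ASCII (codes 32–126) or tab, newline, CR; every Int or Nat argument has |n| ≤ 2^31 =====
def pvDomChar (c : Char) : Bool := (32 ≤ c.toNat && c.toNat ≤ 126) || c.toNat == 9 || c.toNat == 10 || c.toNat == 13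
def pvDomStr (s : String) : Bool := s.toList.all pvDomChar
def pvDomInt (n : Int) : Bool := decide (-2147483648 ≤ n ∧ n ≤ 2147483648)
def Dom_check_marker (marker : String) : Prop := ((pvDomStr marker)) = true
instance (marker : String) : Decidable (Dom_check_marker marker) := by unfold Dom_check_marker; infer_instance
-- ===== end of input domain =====

-- B replaces A's incrementally trimmed sliding-window lists by the jump algorithm (scan each
-- 14-char window backwards, jump past the first duplicate found). Pre_ excludes exactly the
-- inputs on which A falls off its loop and returns None (empty string, or no 14-distinct
-- window and the last character repeating inside the longest duplicate-free suffix).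

-- ===== PORT A =====
-- the loop 'for i in range(len(marker))' over the remaining characters, with A's state
-- (lst, lst_i); 'none' = A falls off the loop returning Python None (excluded by Pre_).
def aLoop : List Char → Nat → Nat → List Char → List Int → Option Int
  | [], _, _, _, _ => none
  | c :: rest, n, i, lst, lst_i =>
    if c ∈ lst then
      -- index_to_delete = lst.index(marker[i]) + 1; trim both lists, append current
      let idx := lst.idxOf c + 1
      aLoop rest n (i+1) (lst.drop idx ++ [c]) (lst_i.drop idx ++ [(i : Int)])
    else
      let lst' := lst ++ [c]
      let lsti' := lst_i ++ [(i : Int)]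
      if lst'.length = 14 then some (i : Int)
      else if i + 1 = n then some ((n : Int) - (lst'.length : Int))
      else aLoop rest n (i+1) lst' lsti'

def check_marker (marker : String) : Int :=
  (aLoop marker.toList marker.toList.length 0 [] []).getD 0

-- ===== PORT B =====
-- inner 'while j >= i-13 and marker[j] not in seen: seen.add(marker[j]); j -= 1':
-- it reads marker[i], marker[i-1], …, marker[i-13], i.e. traverses the reversed window
-- slice (all indices in range, so list recursion over that slice is exact); the SAME loop
-- shape is Source B's final fallback scan (there over the whole reversed string, j from n-1).
def bScan : List Char → PySem.Set Char → Int → Int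
  | [], _, j => j
  | c :: rest, seen, j => if c ∈ seen then j else bScan rest (PySem.Set.add seen c) (j - 1)

-- outer 'while i < n' of Source B; some i = 'return i' inside the loop, none = loop exhausted
def bOuter (s : List Char) (n : Nat) (i : Nat) : Option Int :=
  if hi : i < n then
    let j := bScan ((s.drop (i - 13)).take 14).reverse PySem.Set.empty (i : Int)
    if hj : j < (i : Int) - 13 then some (i : Int)
    else bOuter s n (j + 14).toNat
  else none
termination_by n - i
decreasing_by
  simp only [not_lt] at hj
  omega

def check_marker_alt (marker : String) : Int :=
  let s := marker.toList
  match bOuter s s.length 13 with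
  | some r => r
  | none =>
    -- fallback: 'seen=set(); j=n-1; while j>=0 and marker[j] not in seen: …; return j+1'
    (bScan s.reverse PySem.Set.empty ((s.length : Int) - 1)) + 1

-- ===== PRECONDITION & SPEC =====
-- EW s e: a duplicate-free 14-character window of s ends at index e
abbrev EW (s : List Char) (e : Nat) : Prop :=
  13 ≤ e ∧ e < s.length ∧ ((s.drop (e - 13)).take 14).Nodup

-- DupLast s: the last character of s occurs inside some duplicate-free suffix of s.dropLast
-- (equivalently: inside A's window when A processes the last character)
abbrev DupLast (s : List Char) : Prop :=
  ∃ k < s.length, (s.dropLast.drop k).Nodup ∧ ¬ (s.drop k).Nodup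

-- Pre_ excludes exactly the inputs on which A returns Python None (no value of type int):
-- the empty string, and strings with no duplicate-free 14-window whose last character takes
-- A's duplicate branch, whose continue statement at the final index skips the end-of-string return.
def Pre_check_marker (marker : String) : Prop :=
  marker.toList ≠ [] ∧
    ((∃ e < marker.toList.length, EW marker.toList e) ∨ ¬ DupLast marker.toList)
instance (marker : String) : Decidable (Pre_check_marker marker) := by
  unfold Pre_check_marker; infer_instance

def pvWitness_check_marker : String := "ab"

def Spec_check_marker (marker : String) (out : Int) : Prop := out = check_marker_alt marker
instance (marker : String) (out : Int) : Decidable (Spec_check_marker marker out) := by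
  unfold Spec_check_marker; infer_instance

-- ===== CLAIM (what is proved, stated in full; the proofs are below) =====
def Claim_equal_check_marker : Prop := ∀ (marker : String), Dom_check_marker marker →
  Pre_check_marker marker → Spec_check_marker marker (check_marker marker)

-- ===== LEMMAS AND PROOFS =====

-- skStart v: start index of the longest duplicate-free suffix of v
def skStart (v : List Char) : Nat :=
  Nat.find (p := fun t => (v.drop t).Nodup) ⟨v.length, by simp⟩

lemma skStart_nodup (v : List Char) : (v.drop (skStart v)).Nodup :=
  Nat.find_spec (p := fun t => (v.drop t).Nodup) ⟨v.length, by simp⟩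

lemma skStart_min (v : List Char) {t : Nat} (h : t < skStart v) : ¬ (v.drop t).Nodup :=
  Nat.find_min (p := fun t => (v.drop t).Nodup) ⟨v.length, by simp⟩ h

lemma skStart_le (v : List Char) {t : Nat} (h : (v.drop t).Nodup) : skStart v ≤ t :=
  Nat.find_min' (p := fun t => (v.drop t).Nodup) ⟨v.length, by simp⟩ h

lemma skStart_le_length (v : List Char) : skStart v ≤ v.length :=
  skStart_le v (by simp)

lemma drop_suffix_drop (l : List Char) {m k : Nat} (h : k ≤ m) : l.drop m <:+ l.drop k := by
  have := List.drop_suffix (m - k) (l.drop k)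
  rw [List.drop_drop] at this
  rwa [Nat.add_sub_cancel' h] at this

lemma suffix_append_single {u p : List Char} (c : Char) (h : u <:+ p) :
    u ++ [c] <:+ p ++ [c] := by
  obtain ⟨t, rfl⟩ := h
  exact ⟨t, by rw [List.append_assoc]⟩



-- Good p w : w is A's window after processing prefix p = the longest duplicate-free suffix
def Good (p w : List Char) : Prop :=
  w.Nodup ∧ w <:+ p ∧ ∀ k, (p.drop k).Nodup → p.length - k ≤ w.length

lemma good_nil : Good [] [] := ⟨List.nodup_nil, List.nil_suffix, by simp⟩

lemma suffix_eq_drop {u p : List Char} (h : u <:+ p) : p.drop (p.length - u.length) = u := by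
  obtain ⟨t, rfl⟩ := h
  have : (t ++ u).length - u.length = t.length := by simp
  rw [this, List.drop_left]

lemma suffix_comparable {u w p : List Char} (hu : u <:+ p) (hw : w <:+ p)
    (hl : u.length ≤ w.length) : u <:+ w := by
  have h1 := suffix_eq_drop hu
  have h2 := suffix_eq_drop hw
  have hup : u.length ≤ p.length := hu.length_le
  have hwp : w.length ≤ p.length := hw.length_le
  have := drop_suffix_drop p (m := p.length - u.length) (k := p.length - w.length) (by omega)
  rwa [h1, h2] at this

lemma good_length_le {p w : List Char} (h : Good p w) : w.length ≤ p.length :=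
  h.2.1.length_le

-- the step A performs on its window
def stepw (w : List Char) (c : Char) : List Char :=
  (if c ∈ w then w.drop (w.idxOf c + 1) else w) ++ [c]

lemma stepw_good {p w : List Char} {c : Char} (h : Good p w) : Good (p ++ [c]) (stepw w c) := by
  obtain ⟨hnd, hsuf, hmax⟩ := h
  by_cases hc : c ∈ w
  · -- duplicate branch
    simp only [stepw, if_pos hc]
    set idx := w.idxOf c with hidx
    have hlt : idx < w.length := List.idxOf_lt_length_of_mem hc
    have hget : w[idx] = c := List.getElem_idxOf hlt
    have hdropidx : w.drop idx = c :: w.drop (idx + 1) := by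
      rw [List.drop_eq_getElem_cons hlt, hget]
    have hbnd : (w.drop idx).Nodup := hnd.sublist (List.drop_suffix idx w).sublist
    rw [hdropidx, List.nodup_cons] at hbnd
    obtain ⟨hcb, hbn⟩ := hbnd
    refine ⟨?_, ?_, ?_⟩
    · simp only [List.nodup_append, List.nodup_cons]
      exact ⟨hbn, by simp, by intro a ha b hb; simp at hb; subst hb; exact fun h => hcb (h ▸ ha)⟩
    · exact suffix_append_single c ((List.drop_suffix (idx+1) w).trans hsuf)
    · intro k hk
      by_cases hkle : k ≤ p.length
      · rw [List.drop_append_of_le_length hkle, List.nodup_append] at hk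
        obtain ⟨hk1, _, hk3⟩ := hk
        have hcnot : c ∉ p.drop k := fun hmem => hk3 c hmem c (by simp) rfl
        have hub : p.length - k ≤ w.length := hmax k hk1
        -- show p.drop k is short: it cannot contain c, but suffixes of w longer than
        -- w.drop (idx+1) do contain c
        by_contra hcon
        simp only [not_le] at hcon
        simp only [List.length_append, List.length_cons, List.length_nil] at hcon
        have hlen2 : (w.drop (idx+1)).length = w.length - (idx+1) := List.length_drop ..
        have husuf : p.drop k <:+ w := by
          refine suffix_comparable (List.drop_suffix k p) hsuf ?_
          rw [List.length_drop]; exact hub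
        -- p.drop k = w.drop (w.length - (p.drop k).length), and that drop amount ≤ idx
        have heq : w.drop (w.length - (p.drop k).length) = p.drop k := suffix_eq_drop husuf
        have hdl : (p.drop k).length = p.length - k := List.length_drop ..
        have hamt : w.length - (p.drop k).length ≤ idx := by omega
        have hcin : c ∈ w.drop (w.length - (p.drop k).length) := by
          have : w.drop idx <:+ w.drop (w.length - (p.drop k).length) :=
            drop_suffix_drop w hamt
          exact this.sublist.mem (by rw [hdropidx]; exact List.mem_cons_self)
        rw [heq] at hcin
        exact hcnot hcin
      · have : (p ++ [c]).length - k ≤ 1 := by simp; omega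
        simp only [List.length_append, List.length_cons, List.length_nil] at this ⊢
        omega
  · -- fresh-character branch
    simp only [stepw, if_neg hc]
    refine ⟨?_, suffix_append_single c hsuf, ?_⟩
    · simp only [List.nodup_append, List.nodup_cons]
      exact ⟨hnd, by simp, by intro a ha b hb; simp at hb; subst hb; exact fun h => hc (h ▸ ha)⟩
    · intro k hk
      by_cases hkle : k ≤ p.length
      · rw [List.drop_append_of_le_length hkle, List.nodup_append] at hk
        have := hmax k hk.1
        simp only [List.length_append, List.length_cons, List.length_nil]
        omega
      · simp only [List.length_append, List.length_cons, List.length_nil]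
        omega

lemma stepw_len_dup {w : List Char} {c : Char} (hc : c ∈ w) :
    (stepw w c).length ≤ w.length := by
  have hlt : w.idxOf c < w.length := List.idxOf_lt_length_of_mem hc
  simp only [stepw, if_pos hc, List.length_append, List.length_drop, List.length_cons,
    List.length_nil]
  omega



-- a window of 14 in the maintained state ↔ a duplicate-free 14-window ends the prefix
lemma good_fourteen_iff {p rest w : List Char} (h : Good p w) (hp : p ≠ []) :
    14 ≤ w.length ↔ EW (p ++ rest) (p.length - 1) := by
  have hwp := good_length_le h
  have hplen : 1 ≤ p.length := List.length_pos_iff.mpr hp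
  constructor
  · intro h14
    have hp14 : 14 ≤ p.length := le_trans h14 hwp
    refine ⟨by omega, by simp; omega, ?_⟩
    have hk : p.length - 1 - 13 = p.length - 14 := by omega
    rw [hk, List.drop_append_of_le_length (by omega)]
    have hlen : (p.drop (p.length - 14)).length = 14 := by rw [List.length_drop]; omega
    rw [List.take_left' hlen]
    have hsuf : p.drop (p.length - 14) <:+ w := by
      refine suffix_comparable (List.drop_suffix _ p) h.2.1 ?_
      rw [hlen]; exact h14
    exact h.1.sublist hsuf.sublist
  · rintro ⟨he13, _, hnd⟩
    have hp14 : 14 ≤ p.length := by omega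
    have hk : p.length - 1 - 13 = p.length - 14 := by omega
    rw [hk, List.drop_append_of_le_length (by omega)] at hnd
    have hlen : (p.drop (p.length - 14)).length = 14 := by rw [List.length_drop]; omega
    rw [List.take_left' hlen] at hnd
    have := h.2.2 (p.length - 14) hnd
    omega

lemma sk_good {s w : List Char} (h : Good s w) : skStart s = s.length - w.length := by
  have h1 : skStart s ≤ s.length - w.length := by
    apply skStart_le
    rw [suffix_eq_drop h.2.1]; exact h.1
  have h2 := h.2.2 (skStart s) (skStart_nodup s)
  have := good_length_le h
  omega

-- ===== A-side main lemmas =====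

lemma aLoop_dup {rest : List Char} {n i : Nat} {lst : List Char} {lst_i : List Int} {c : Char}
    (hc : c ∈ lst) :
    aLoop (c :: rest) n i lst lst_i
      = aLoop rest n (i+1) (stepw lst c) (lst_i.drop (lst.idxOf c + 1) ++ [(i : Int)]) := by
  simp [aLoop, hc, stepw]

lemma aLoop_fresh {rest : List Char} {n i : Nat} {lst : List Char} {lst_i : List Int} {c : Char}
    (hc : c ∉ lst) :
    aLoop (c :: rest) n i lst lst_i
      = (if (lst ++ [c]).length = 14 then some (i : Int)
         else if i + 1 = n then some ((n : Int) - ((lst ++ [c]).length : Int))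
         else aLoop rest n (i+1) (lst ++ [c]) (lst_i ++ [(i : Int)])) := by
  simp [aLoop, hc]



lemma A1 : ∀ (r p lst : List Char) (lst_i : List Int) (e : Nat),
    Good p lst → lst.length < 14 → lst_i.length = lst.length →
    EW (p ++ r) e → (∀ e', e' < e → ¬ EW (p ++ r) e') → p.length ≤ e →
    aLoop r (p ++ r).length p.length lst lst_i = some (e : Int) := by
  intro r
  induction r with
  | nil =>
    intro p lst lst_i e _ _ _ hew _ hpe
    exfalso
    obtain ⟨_, he2, _⟩ := hew
    simp only [List.append_nil] at he2
    omega
  | cons c r' ih =>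
    intro p lst lst_i e hg hl hli hew hmin hpe
    have hassoc : p ++ c :: r' = (p ++ [c]) ++ r' := by simp
    have hpcne : p ++ [c] ≠ [] := by simp
    have hplen : (p ++ [c]).length - 1 = p.length := by simp
    by_cases hc : c ∈ lst
    · -- duplicate branch
      rw [aLoop_dup hc]
      have hg' : Good (p ++ [c]) (stepw lst c) := stepw_good hg
      have hiff := good_fourteen_iff (rest := r') hg' hpcne
      rw [hplen, ← hassoc] at hiff
      have hlen' : (stepw lst c).length ≤ lst.length := stepw_len_dup hc
      have hne : e ≠ p.length := by
        intro he
        have := hiff.mpr (he ▸ hew)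
        omega
      have hli' : (lst_i.drop (lst.idxOf c + 1) ++ [(p.length : Int)]).length
          = (stepw lst c).length := by
        have := List.idxOf_lt_length_of_mem hc
        simp [stepw, if_pos hc, hli]
      rw [hassoc] at hew hmin ⊢
      have hL : ((p ++ [c]) ++ r').length = ((p ++ [c]) ++ r').length := rfl
      have hP : p.length + 1 = (p ++ [c]).length := by simp
      rw [hP]
      exact ih (p ++ [c]) (stepw lst c) _ e hg' (by omega) hli' hew hmin (by simp; omega)
    · -- fresh branch
      rw [aLoop_fresh hc]
      have hstep : stepw lst c = lst ++ [c] := by simp [stepw, if_neg hc]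
      have hg' : Good (p ++ [c]) (lst ++ [c]) := hstep ▸ stepw_good hg
      have hiff := good_fourteen_iff (rest := r') hg' hpcne
      rw [hplen, ← hassoc] at hiff
      have hlf : (lst ++ [c]).length = lst.length + 1 := by simp
      by_cases h14 : (lst ++ [c]).length = 14
      · rw [if_pos h14]
        have hewp : EW (p ++ c :: r') p.length := hiff.mp (by omega)
        have : ¬ p.length < e := fun hlt => hmin p.length hlt hewp
        have : e = p.length := by omega
        rw [this]
      · rw [if_neg h14]
        have hne : e ≠ p.length := by
          intro he
          have := hiff.mpr (he ▸ hew)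
          omega
        have hend : ¬ (p.length + 1 = (p ++ c :: r').length) := by
          intro habs
          have hr' : r' = [] := by
            have hx : (p ++ c :: r').length = p.length + 1 + r'.length := by
              simp only [List.length_append, List.length_cons]; omega
            rw [hx] at habs
            have : r'.length = 0 := by omega
            exact List.length_eq_zero_iff.mp this
          subst hr'
          have he2 := hew.2.1
          simp only [List.length_append, List.length_cons, List.length_nil] at he2
          have : e = p.length := by omega
          exact hne this
        rw [if_neg hend]
        rw [hassoc] at hew hmin ⊢
        have hP : p.length + 1 = (p ++ [c]).length := by simp
        rw [hP]
        exact ih (p ++ [c]) (lst ++ [c]) _ e hg' (by omega)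
          (by simp [hli]) hew hmin (by simp; omega)

lemma A2 : ∀ (r p lst : List Char) (lst_i : List Int),
    r ≠ [] → Good p lst → lst.length < 14 → lst_i.length = lst.length →
    (∀ e, ¬ EW (p ++ r) e) → ¬ DupLast (p ++ r) →
    aLoop r (p ++ r).length p.length lst lst_i = some ((skStart (p ++ r) : Nat) : Int) := by
  intro r
  induction r with
  | nil => intro p lst lst_i hne; exact absurd rfl hne
  | cons c r' ih =>
    intro p lst lst_i _ hg hl hli hnew hndl
    have hassoc : p ++ c :: r' = (p ++ [c]) ++ r' := by simp
    have hpcne : p ++ [c] ≠ [] := by simp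
    have hplen : (p ++ [c]).length - 1 = p.length := by simp
    by_cases hr' : r' = []
    · subst hr'
      -- final character
      by_cases hc : c ∈ lst
      · exfalso
        apply hndl
        have hwp := good_length_le hg
        refine ⟨p.length - lst.length,
          by simp only [List.length_append, List.length_cons, List.length_nil]; omega, ?_, ?_⟩
        · rw [List.dropLast_concat]
          rw [suffix_eq_drop hg.2.1]
          exact hg.1
        · have hk : p.length - lst.length ≤ p.length := by omega
          rw [List.drop_append_of_le_length hk, suffix_eq_drop hg.2.1]
          intro habs
          rw [List.nodup_append] at habs
          exact habs.2.2 c hc c (by simp) rfl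
      · rw [aLoop_fresh hc]
        have hstep : stepw lst c = lst ++ [c] := by simp [stepw, if_neg hc]
        have hg' : Good (p ++ [c]) (lst ++ [c]) := hstep ▸ stepw_good hg
        have hiff := good_fourteen_iff (rest := ([] : List Char)) hg' hpcne
        rw [hplen, List.append_nil] at hiff
        have h14 : ¬ (lst ++ [c]).length = 14 := by
          intro habs
          exact hnew p.length (hiff.mp (by omega))
        rw [if_neg h14, if_pos (by simp)]
        have hsk := sk_good hg'
        have hle := good_length_le hg'
        have hcast : ((p ++ [c]).length : Int) - ((lst ++ [c]).length : Int)
            = ((skStart (p ++ [c]) : Nat) : Int) := by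
          rw [hsk]
          have : (lst ++ [c]).length ≤ (p ++ [c]).length := hle
          omega
        rw [hcast]
    · -- not the last character
      by_cases hc : c ∈ lst
      · rw [aLoop_dup hc]
        have hg' : Good (p ++ [c]) (stepw lst c) := stepw_good hg
        have hlen' : (stepw lst c).length ≤ lst.length := stepw_len_dup hc
        have hli' : (lst_i.drop (lst.idxOf c + 1) ++ [(p.length : Int)]).length
            = (stepw lst c).length := by
          have := List.idxOf_lt_length_of_mem hc
          simp [stepw, if_pos hc, hli]
        rw [hassoc] at hnew hndl ⊢
        have hP : p.length + 1 = (p ++ [c]).length := by simp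
        rw [hP]
        exact ih (p ++ [c]) (stepw lst c) _ hr' hg' (by omega) hli' hnew hndl
      · rw [aLoop_fresh hc]
        have hstep : stepw lst c = lst ++ [c] := by simp [stepw, if_neg hc]
        have hg' : Good (p ++ [c]) (lst ++ [c]) := hstep ▸ stepw_good hg
        have hiff := good_fourteen_iff (rest := r') hg' hpcne
        rw [hplen, ← hassoc] at hiff
        have hlf : (lst ++ [c]).length = lst.length + 1 := by simp
        have h14 : ¬ (lst ++ [c]).length = 14 := by
          intro habs
          exact hnew p.length (hiff.mp (by omega))
        rw [if_neg h14]
        have hend : ¬ (p.length + 1 = (p ++ c :: r').length) := by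
          intro habs
          have hx : (p ++ c :: r').length = p.length + 1 + r'.length := by
            simp only [List.length_append, List.length_cons]; omega
          rw [hx] at habs
          have : r'.length = 0 := by omega
          exact hr' (List.length_eq_zero_iff.mp this)
        rw [if_neg hend]
        rw [hassoc] at hnew hndl ⊢
        have hP : p.length + 1 = (p ++ [c]).length := by simp
        rw [hP]
        exact ih (p ++ [c]) (lst ++ [c]) _ hr' hg' (by omega) (by simp [hli]) hnew hndl

-- ===== B-side main lemmas =====

lemma skStart_concat_mem {q' w : List Char} {c : Char} (hcw : c ∈ w) (hw : w.Nodup) :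
    skStart ((q' ++ [c]) ++ w) = (q' ++ [c]).length := by
  have hdropfull : ((q' ++ [c]) ++ w).drop (q' ++ [c]).length = w := List.drop_left ..
  have hdropc : ((q' ++ [c]) ++ w).drop q'.length = c :: w := by
    have : (q' ++ [c]) ++ w = q' ++ (c :: w) := by simp
    rw [this, List.drop_left]
  apply le_antisymm
  · exact skStart_le _ (by rw [hdropfull]; exact hw)
  · by_contra habs
    simp only [not_le] at habs
    have hsk := skStart_nodup ((q' ++ [c]) ++ w)
    have hlen : (q' ++ [c]).length = q'.length + 1 := by simp
    have hle : skStart ((q' ++ [c]) ++ w) ≤ q'.length := by omega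
    have hsufx : ((q' ++ [c]) ++ w).drop q'.length <:+
        ((q' ++ [c]) ++ w).drop (skStart ((q' ++ [c]) ++ w)) :=
      drop_suffix_drop _ hle
    have : (c :: w).Nodup := hsk.sublist (hdropc ▸ hsufx).sublist
    rw [List.nodup_cons] at this
    exact this.1 hcw

lemma scan_spec : ∀ (q seenL w : List Char) (j : Int), w.Nodup → (∀ c, c ∈ seenL ↔ c ∈ w) →
    bScan q.reverse seenL j = j - q.length + skStart (q ++ w) := by
  intro q
  induction q using List.reverseRecOn with
  | nil =>
    intro seenL w j hw _
    have h0 : skStart w = 0 :=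
      Nat.le_zero.mp (skStart_le _ (by simpa using hw))
    simp [bScan, h0]
  | append_singleton q' c ih =>
    intro seenL w j hw hmem
    rw [List.reverse_append]
    simp only [List.reverse_cons, List.reverse_nil, List.nil_append, List.singleton_append]
    by_cases hcw : c ∈ w
    · have hcs : c ∈ seenL := (hmem c).mpr hcw
      rw [bScan, if_pos hcs]
      rw [skStart_concat_mem hcw hw]
      have : ((q' ++ [c]).length : Int) = (q' ++ [c]).length := rfl
      omega
    · have hcs : c ∉ seenL := fun h => hcw ((hmem c).mp h)
      rw [bScan, if_neg hcs]
      have hw' : (c :: w).Nodup := List.nodup_cons.mpr ⟨hcw, hw⟩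
      have hmem' : ∀ x, x ∈ PySem.Set.add seenL c ↔ x ∈ c :: w := by
        intro x
        rw [PySem.Set.mem_add, List.mem_cons]
        rw [hmem x]
        tauto
      have := ih (PySem.Set.add seenL c) (c :: w) (j - 1) hw' hmem'
      rw [this]
      have hre : q' ++ (c :: w) = (q' ++ [c]) ++ w := by simp
      rw [hre]
      have hlen : ((q' ++ [c]).length : Int) = (q'.length : Int) + 1 := by
        simp
      omega

lemma take_drop_sublist (s : List Char) (a d L M : Nat) (hda : d ≤ a) (h2 : a + L ≤ d + M) :
    ((s.drop a).take L).Sublist ((s.drop d).take M) := by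
  have key : ((s.drop d).take M).drop (a - d) = (s.drop a).take (M - (a - d)) := by
    rw [List.drop_take, List.drop_drop, Nat.add_sub_cancel' hda]
  have key2 : (s.drop a).take L = (((s.drop d).take M).drop (a - d)).take L := by
    rw [key, List.take_take]
    congr 1
    omega
  rw [key2]
  exact (List.take_sublist _ _).trans (List.drop_sublist _ _)

lemma jump_sound (s : List Char) (i e : Nat) (h13 : 13 ≤ i) (hin : i < s.length)
    (ht : 1 ≤ skStart ((s.drop (i - 13)).take 14)) (he1 : i ≤ e)
    (he2 : e < i + skStart ((s.drop (i - 13)).take 14)) : ¬ EW s e := by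
  set q := (s.drop (i - 13)).take 14 with hq
  set t := skStart q with htdef
  have hq14 : q.length = 14 := by
    rw [hq, List.length_take, List.length_drop]
    omega
  have ht14 : t ≤ 14 := by rw [htdef, ← hq14]; exact skStart_le_length q
  have hdup : ¬ (q.drop (t - 1)).Nodup := skStart_min q (by omega)
  rintro ⟨he13, helen, hnod⟩
  apply hdup
  have hform : q.drop (t - 1) = (s.drop ((i - 13) + (t - 1))).take (15 - t) := by
    rw [hq, List.drop_take, List.drop_drop]
    congr 1
    omega
  rw [hform]
  exact hnod.sublist
    (take_drop_sublist s ((i - 13) + (t - 1)) (e - 13) (15 - t) 14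
      (by omega) (by omega))

lemma bOuter_some : ∀ (d : Nat) (s : List Char) (i e : Nat), s.length - i ≤ d →
    13 ≤ i → (∀ e', e' < i → ¬ EW s e') → EW s e → (∀ e', e' < e → ¬ EW s e') →
    bOuter s s.length i = some (e : Int) := by
  intro d
  induction d with
  | zero =>
    intro s i e h0 h13 hlow hew hmin
    exfalso
    have hie : i ≤ e := by
      by_contra hx
      exact hlow e (by omega) hew
    have := hew.2.1
    omega
  | succ d ih =>
    intro s i e hd h13 hlow hew hmin
    have hie : i ≤ e := by
      by_contra hx
      exact hlow e (by omega) hew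
    have hin : i < s.length := lt_of_le_of_lt hie hew.2.1
    have hq14 : ((s.drop (i - 13)).take 14).length = 14 := by
      rw [List.length_take, List.length_drop]; omega
    have hscan := scan_spec ((s.drop (i - 13)).take 14) PySem.Set.empty [] (i : Int)
      List.nodup_nil (by intro c; simp [PySem.Set.empty])
    rw [List.append_nil] at hscan
    rw [bOuter, dif_pos hin]
    simp only [hscan, hq14]
    by_cases ht : skStart ((s.drop (i - 13)).take 14) = 0
    · have hqnd : ((s.drop (i - 13)).take 14).Nodup := by
        have := skStart_nodup ((s.drop (i - 13)).take 14)
        rwa [ht, List.drop_zero] at this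
      have hewi : EW s i := ⟨h13, hin, hqnd⟩
      have : ¬ i < e := fun hx => hmin i hx hewi
      have hei : e = i := by omega
      rw [dif_pos (by rw [ht]; push_cast; omega), hei]
    · have ht1 : 1 ≤ skStart ((s.drop (i - 13)).take 14) := by omega
      rw [dif_neg (by omega)]
      have harg : ((i : Int) - ↑(14 : Nat) + ↑(skStart ((s.drop (i - 13)).take 14)) + 14).toNat
          = i + skStart ((s.drop (i - 13)).take 14) := by omega
      rw [harg]
      apply ih
      · omega
      · omega
      · intro e' he'
        rcases Nat.lt_or_ge e' i with hx | hx
        · exact hlow e' hx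
        · exact jump_sound s i e' h13 hin ht1 hx he'
      · exact hew
      · exact hmin

lemma bOuter_none : ∀ (d : Nat) (s : List Char) (i : Nat), s.length - i ≤ d →
    13 ≤ i → (∀ e, ¬ EW s e) → bOuter s s.length i = none := by
  intro d
  induction d with
  | zero =>
    intro s i h0 h13 hnone
    rw [bOuter, dif_neg (by omega)]
  | succ d ih =>
    intro s i hd h13 hnone
    by_cases hin : i < s.length
    · have hq14 : ((s.drop (i - 13)).take 14).length = 14 := by
        rw [List.length_take, List.length_drop]; omega
      have hscan := scan_spec ((s.drop (i - 13)).take 14) PySem.Set.empty [] (i : Int)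
        List.nodup_nil (by intro c; simp [PySem.Set.empty])
      rw [List.append_nil] at hscan
      rw [bOuter, dif_pos hin]
      simp only [hscan, hq14]
      have ht1 : 1 ≤ skStart ((s.drop (i - 13)).take 14) := by
        by_contra hx
        have ht : skStart ((s.drop (i - 13)).take 14) = 0 := by omega
        have hqnd : ((s.drop (i - 13)).take 14).Nodup := by
          have := skStart_nodup ((s.drop (i - 13)).take 14)
          rwa [ht, List.drop_zero] at this
        exact hnone i ⟨h13, hin, hqnd⟩
      rw [dif_neg (by omega)]
      have harg : ((i : Int) - ↑(14 : Nat) + ↑(skStart ((s.drop (i - 13)).take 14)) + 14).toNat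
          = i + skStart ((s.drop (i - 13)).take 14) := by omega
      rw [harg]
      exact ih s _ (by omega) (by omega) hnone
    · rw [bOuter, dif_neg hin]

-- ===== VERDICT (by name: the statement is the Claim_ definition above) =====
theorem check_marker_spec : Claim_equal_check_marker := by
  unfold Claim_equal_check_marker
  intro marker _ hpre
  unfold Spec_check_marker
  obtain ⟨hne, hdisj⟩ := hpre
  by_cases h : ∃ e, EW marker.toList e
  · obtain ⟨e0, hew0, hmin0⟩ : ∃ e0, EW marker.toList e0 ∧ ∀ e' < e0, ¬ EW marker.toList e' :=
      ⟨Nat.find h, Nat.find_spec h, fun e' he' => Nat.find_min h he'⟩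
    have hA := A1 marker.toList [] [] [] e0 good_nil (by norm_num) rfl
      (by simpa using hew0) (by intro e' he'; simpa using hmin0 e' he') (by simp)
    simp only [List.nil_append, List.length_nil] at hA
    have hB := bOuter_some marker.toList.length marker.toList 13 e0 (by omega) (by norm_num)
      (fun e' he' hew => by exact absurd hew.1 (by omega)) hew0 hmin0
    simp only [check_marker, check_marker_alt, hA, hB, Option.getD_some]
  · have hnone : ∀ e, ¬ EW marker.toList e := fun e hew => h ⟨e, hew⟩
    have hndl : ¬ DupLast marker.toList := by
      rcases hdisj with hwin | hn
      · exfalso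
        obtain ⟨e, _, hew⟩ := hwin
        exact h ⟨e, hew⟩
      · exact hn
    have hA := A2 marker.toList [] [] [] hne good_nil (by norm_num) rfl
      (by simpa using hnone) (by simpa using hndl)
    simp only [List.nil_append, List.length_nil] at hA
    have hB := bOuter_none marker.toList.length marker.toList 13 (by omega) (by norm_num) hnone
    have hscan := scan_spec marker.toList PySem.Set.empty [] ((marker.toList.length : Int) - 1)
      List.nodup_nil (by intro c; simp [PySem.Set.empty])
    rw [List.append_nil] at hscan
    have hsk := skStart_le_length marker.toList
    simp only [check_marker, check_marker_alt, hA, hB, Option.getD_some, hscan]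
    omega
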